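-- pv_equiv track=rewrite | github.com/DaKnig/Da-KComputer | Graphics_take_2/HDMI_symbols.py | TMDS_encode
-- ===== SOURCE A (Python) =====
-- def TMDS_encode(data: int, inverted: bool = False):
--     # does not perform the last flipping step.
--     if data > 239:
--         data=239
--     if data < 16:
--         data=16
--
--     ones = 0
--     for i in bin(data)[2:]:
--         ones += int(i)
--
--     use_xnor = (ones > 4) or (ones == 4 and data&1 == 0)
--
--     result = [data&1] + [0]*8
--     data = [(data>>i)&1 for i in range(8)]
--     for i in range(1,8):
--         if use_xnor:
--             result[i] = 1^data[i]^result[i-1]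
--         else:
--             result[i] = data[i] ^ result[i-1]
--     result[8] = int(not use_xnor)
--     if not inverted :
--         result = [0]+result[::-1]
--     else:
--         result = [1] + [result[8]] + [[1,0][i] for i in result[0:8]][::-1]
--     result = ''.join([str(i) for i in result[::-1]])[::-1]
--     return int(result,base=2)
-- ===== SOURCE B (Python) =====
-- def TMDS_encode(data: int, inverted: bool = False):
--     # does not perform the last flipping step.
--     d = min(239, max(16, data))
--     ones = bin(d).count("1")
--     use_xnor = ones > 4 or (ones == 4 and d & 1 == 0)
--     # prefix-xor of the 8 data bits, computed loop-free
--     p = d & 0xFF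
--     p ^= (p << 1) & 0xFF
--     p ^= (p << 2) & 0xFF
--     p ^= (p << 4) & 0xFF
--     q = p ^ (0xAA if use_xnor else 0)          # bits 0..7 of the symbol
--     if not use_xnor:
--         q |= 0x100                             # bit 8
--     if not inverted:
--         return q
--     return 0x200 | (q & 0x100) | ((q & 0xFF) ^ 0xFF)
-- ===== Notes on version B (the rewrite author's own statement) =====
-- stated objective: simpler
-- what changed: B keeps the clamp and XOR/XNOR mode choice but replaces A's per-bit list transition loop and string-join/reverse/int(base=2) assembly with a loop-free SWAR prefix-xor (p ^= p<<1,<<2,<<4) plus constant bit masks for the inverted/bit-8 assembly.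
import Mathlib
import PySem

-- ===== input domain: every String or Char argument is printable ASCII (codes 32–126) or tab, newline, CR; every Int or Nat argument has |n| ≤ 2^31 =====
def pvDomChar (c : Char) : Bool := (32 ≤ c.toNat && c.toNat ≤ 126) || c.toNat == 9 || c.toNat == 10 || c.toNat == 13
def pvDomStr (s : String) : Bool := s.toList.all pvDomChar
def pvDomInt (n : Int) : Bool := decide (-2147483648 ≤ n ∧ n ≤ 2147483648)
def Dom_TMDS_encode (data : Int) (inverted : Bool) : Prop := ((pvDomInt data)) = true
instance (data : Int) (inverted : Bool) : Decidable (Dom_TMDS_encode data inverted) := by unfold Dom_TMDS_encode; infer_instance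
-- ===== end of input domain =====

-- B replaces A's bit-list/string machinery by a loop-free arithmetic assembly
-- (SWAR prefix-xor and bit masks); objective: simpler.

-- ===== PORT A =====
-- body of A after the two clamping ifs (helper of the transliteration)
def TMDS_body (data : Int) (inverted : Bool) : Int :=
  -- ones = popcount via iterating the characters of bin(data)[2:]
  let ones : Int := ((PySem.Int.toBinChars0b data).drop 2).foldl
      (fun acc i => acc + ((PySem.Int.ofStr? (String.mk [i])).getD 0)) 0
  let use_xnor : Bool := (ones > 4) || (ones == 4 && PySem.Int.band data 1 == 0)
  let result : List Int := [PySem.Int.band data 1] ++ List.replicate 8 0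
  let dataBits : List Int :=
    (PySem.List.pyRange 0 8 1).map (fun i => PySem.Int.band (data >>> i.toNat) 1)
  let result : List Int :=
    (PySem.List.pyRange 1 8 1).foldl
      (fun res i =>
        if use_xnor then
          res.set i.toNat (PySem.Int.bxor 1 (PySem.Int.bxor (PySem.List.pyGetD dataBits i 0) (PySem.List.pyGetD res (i-1) 0)))
        else
          res.set i.toNat (PySem.Int.bxor (PySem.List.pyGetD dataBits i 0) (PySem.List.pyGetD res (i-1) 0)))
      result
  let result : List Int := result.set 8 (if use_xnor then 0 else 1)
  let result : List Int :=
    if !inverted then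
      [0] ++ result.reverse
    else
      [1] ++ [PySem.List.pyGetD result 8 0] ++
        ((result.take 8).map (fun i => PySem.List.pyGetD ([1, 0] : List Int) i 0)).reverse
  let s : String := PySem.Str.join "" (result.reverse.map (fun i => PySem.Int.toStr i))
  let s : String := String.mk s.toList.reverse
  (PySem.Int.ofStrBase? s 2).getD 0

def TMDS_encode (data : Int) (inverted : Bool) : Int :=
  let data := if data > 239 then 239 else data
  let data := if data < 16 then 16 else data
  TMDS_body data inverted

-- ===== PORT B =====
-- body of B after the clamp (helper of the transliteration)
def TMDS_alt_body (d : Int) (inverted : Bool) : Int :=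
  let ones : Nat := PySem.Int.bitCount d          -- bin(d).count("1")
  let use_xnor : Bool := (ones > 4) || (ones == 4 && PySem.Int.band d 1 == 0)
  let p := PySem.Int.band d 255
  let p := PySem.Int.bxor p (PySem.Int.band (p <<< 1) 255)
  let p := PySem.Int.bxor p (PySem.Int.band (p <<< 2) 255)
  let p := PySem.Int.bxor p (PySem.Int.band (p <<< 4) 255)
  let q := PySem.Int.bxor p (if use_xnor then 170 else 0)
  let q := if !use_xnor then PySem.Int.bor q 256 else q
  if !inverted then q
  else PySem.Int.bor 512 (PySem.Int.bor (PySem.Int.band q 256) (PySem.Int.bxor (PySem.Int.band q 255) 255))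

def TMDS_encode_alt (data : Int) (inverted : Bool) : Int :=
  let d := min 239 (max 16 data)
  TMDS_alt_body d inverted

-- ===== PRECONDITION & SPEC =====
def Spec_TMDS_encode (data : Int) (inverted : Bool) (out : Int) : Prop := out = TMDS_encode_alt data inverted
instance (data : Int) (inverted : Bool) (out : Int) : Decidable (Spec_TMDS_encode data inverted out) := by unfold Spec_TMDS_encode; infer_instance

-- ===== CLAIM (what is proved, stated in full; the proofs are below) =====
def Claim_equal_TMDS_encode : Prop := ∀ (data : Int) (inverted : Bool), Dom_TMDS_encode data inverted → Spec_TMDS_encode data inverted (TMDS_encode data inverted)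

-- ===== LEMMAS AND PROOFS =====

-- the two bodies agree on every clamped value 16 + n, n < 224
set_option maxRecDepth 16384 in
set_option maxHeartbeats 4000000 in
theorem body_eq : ∀ (n : Fin 224) (inv : Bool),
    TMDS_body (16 + (n : Int)) inv = TMDS_alt_body (16 + (n : Int)) inv := by
  decide

-- ===== VERDICT (by name: the statement is the Claim_ definition above) =====
theorem TMDS_encode_spec : Claim_equal_TMDS_encode := by
  intro data inv _
  show TMDS_encode data inv = TMDS_encode_alt data inv
  show TMDS_body (if (if data > 239 then 239 else data) < 16 then 16
      else (if data > 239 then 239 else data)) inv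
    = TMDS_alt_body (min 239 (max 16 data)) inv
  have hclamp : (if (if data > 239 then 239 else data) < 16 then 16
      else (if data > 239 then 239 else data)) = min 239 (max 16 data) := by
    split_ifs <;> omega
  rw [hclamp]
  set c := min 239 (max 16 data) with hc
  have h16 : 16 ≤ c := by omega
  have h239 : c ≤ 239 := by omega
  have hn : (c - 16).toNat < 224 := by omega
  have hrep : c = 16 + ((⟨(c - 16).toNat, hn⟩ : Fin 224) : Int) := by
    simp; omega
  rw [hrep]
  exact body_eq _ inv
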